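-- pv_equiv track=rewrite | github.com/hodosykristof/onlab2 | data_processing.py | player_splitter
-- ===== SOURCE A (Python) =====
-- def player_splitter(data):
--     result = []
--     index = 0
--
--     for i in range(0, len(data) - 1):
--         if isinstance(data[i], str):
--             if all(x.isalpha() or x.isspace() for x in data[i]):
--                 result.append(data[index:i])
--                 index = i
--
--     return result
-- ===== SOURCE B (Python) =====
-- def player_splitter(data):
--     # Streaming split: walk the elements of data[:-1] once, growing the current
--     # chunk element by element; a fully alpha/space string closes the chunk and
--     # starts the next one with itself.  No index arithmetic, no slicing.
--     result = []
--     chunk = []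
--     for elem in data[:-1]:
--         if isinstance(elem, str) and all(x.isalpha() or x.isspace() for x in elem):
--             result.append(chunk)
--             chunk = [elem]
--         else:
--             chunk.append(elem)
--     return result
-- ===== Notes on version B (the rewrite author's own statement) =====
-- stated objective: alternative
-- what changed: Replaces A's index-based loop that repeatedly slices data[index:i] by a single streaming pass over data[:-1] that builds each segment element by element in a chunk accumulator (str.split style), with no indices or slicing at all.
import Mathlib
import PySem

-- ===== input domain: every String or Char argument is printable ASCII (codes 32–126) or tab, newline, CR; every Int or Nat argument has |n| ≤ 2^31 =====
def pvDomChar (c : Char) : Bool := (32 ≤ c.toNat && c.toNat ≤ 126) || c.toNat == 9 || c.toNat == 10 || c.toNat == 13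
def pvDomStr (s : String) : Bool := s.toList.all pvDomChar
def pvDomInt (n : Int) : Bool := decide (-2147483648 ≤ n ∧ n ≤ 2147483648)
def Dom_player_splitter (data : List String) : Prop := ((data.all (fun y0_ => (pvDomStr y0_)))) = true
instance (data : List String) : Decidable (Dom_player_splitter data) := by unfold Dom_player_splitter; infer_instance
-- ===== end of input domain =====

-- header: B replaces A's index-and-slice loop by a single streaming pass over data[:-1]
-- that grows each segment element by element (str.split style); same return value.

-- ===== PORT A =====
-- shared char predicate: all(x.isalpha() or x.isspace() for x in s)
def pvMatch (s : String) : Bool := s.toList.all (fun x => PySem.Chars.isalpha x || PySem.Chars.isspace x)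

-- literal port of A: fold over range(0, len(data)-1) with state (result, index);
-- `isinstance(data[i], str)` is always true for a List String input.
def player_splitter (data : List String) : List (List String) :=
  (((PySem.List.pyRange 0 ((data.length : Int) - 1) 1).foldl
    (fun (st : List (List String) × Int) i =>
      if pvMatch (PySem.List.pyGetD data i "") then
        (st.1 ++ [PySem.List.slice data (some st.2) (some i)], i)
      else st) ([], 0))).1

-- ===== PORT B =====
-- port of Source B: stream over data[:-1] with a (result, chunk) accumulator; a matching
-- element flushes the chunk and starts the next one with itself.
def player_splitter_alt (data : List String) : List (List String) :=
  ((PySem.List.slice data none (some (-1))).foldl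
    (fun (st : List (List String) × List String) elem =>
      if pvMatch elem then (st.1 ++ [st.2], [elem]) else (st.1, st.2 ++ [elem]))
    ([], [])).1

-- ===== PRECONDITION & SPEC =====
def Spec_player_splitter (data : List String) (out : List (List String)) : Prop := out = player_splitter_alt data
instance (data : List String) (out : List (List String)) : Decidable (Spec_player_splitter data out) := by unfold Spec_player_splitter; infer_instance

-- ===== CLAIM (what is proved, stated in full; the proofs are below) =====
def Claim_equal_player_splitter : Prop := ∀ (data : List String), Dom_player_splitter data → Spec_player_splitter data (player_splitter data)

-- ===== LEMMAS AND PROOFS =====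

-- invariant: after the first k positions, A's chunk-to-come is data[idx:k], which is
-- exactly B's chunk accumulator.
lemma pv_key (data : List String) (m : Nat) (hm : m + 1 = data.length) :
    ∀ (j k idx : Nat) (res : List (List String)) (chunk : List String),
      j = m - k → idx ≤ k → k ≤ m → chunk = (data.drop idx).take (k - idx) →
      ((PySem.List.pyRange (k : Int) (m : Int) 1).foldl
        (fun (st : List (List String) × Int) i =>
          if pvMatch (PySem.List.pyGetD data i "") then
            (st.1 ++ [PySem.List.slice data (some st.2) (some i)], i)
          else st) (res, (idx : Int))).1
      = ((data.dropLast.drop k).foldl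
          (fun (st : List (List String) × List String) elem =>
            if pvMatch elem then (st.1 ++ [st.2], [elem]) else (st.1, st.2 ++ [elem]))
          (res, chunk)).1 := by
  intro j
  induction j with
  | zero =>
    intro k idx res chunk hj hik hkm hchunk
    have hkm' : k = m := by omega
    subst hkm'
    have h1 : PySem.List.pyRange (k : Int) (k : Int) 1 = [] := by
      simp
    have h2 : data.dropLast.drop k = [] := by
      apply List.drop_eq_nil_of_le
      simp [List.length_dropLast]; omega
    simp [h1, h2]
  | succ j ih =>
    intro k idx res chunk hj hik hkm hchunk
    have hklt : k < m := by omega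
    have hkn : k < data.length := by omega
    have hcons : PySem.List.pyRange (k : Int) (m : Int) 1
        = (k : Int) :: PySem.List.pyRange ((k : Int) + 1) (m : Int) 1 :=
      PySem.List.pyRange_one_cons (by exact_mod_cast hklt)
    have hdl : k < data.dropLast.length := by simp [List.length_dropLast]; omega
    have hdrop : data.dropLast.drop k = data[k] :: data.dropLast.drop (k + 1) := by
      rw [List.drop_eq_getElem_cons hdl]
      simp [List.getElem_dropLast]
    have hget : PySem.List.pyGetD data (k : Int) "" = data[k] := by
      simp [PySem.List.pyGetD_natCast, List.getD_eq_getElem?_getD, hkn]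
    have hcast : ((k : Int) + 1) = ((k + 1 : Nat) : Int) := by push_cast; ring
    rw [hcons, hdrop]
    simp only [List.foldl_cons, hget]
    by_cases hmatch : pvMatch data[k] = true
    · rw [if_pos hmatch, if_pos hmatch]
      have hslice : PySem.List.slice data (some (idx : Int)) (some (k : Int))
          = (data.drop idx).take (k - idx) := PySem.List.slice_natCast data idx k
      rw [hslice, ← hchunk, hcast]
      exact ih (k + 1) k (res ++ [chunk]) [data[k]] (by omega) (by omega) (by omega)
        (by rw [show k + 1 - k = 1 by omega]
            simp [List.take_one, List.head?_drop, List.getElem?_eq_getElem hkn])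
    · rw [if_neg hmatch, if_neg hmatch]
      rw [hcast]
      refine ih (k + 1) idx res (chunk ++ [data[k]]) (by omega) (by omega) (by omega) ?_
      rw [show k + 1 - idx = (k - idx) + 1 by omega, List.take_add_one, ← hchunk]
      have : (data.drop idx)[k - idx]? = some data[k] := by
        rw [List.getElem?_drop, show idx + (k - idx) = k by omega]
        exact List.getElem?_eq_getElem hkn
      simp [this]

-- ===== VERDICT (by name: the statement is the Claim_ definition above) =====
theorem player_splitter_spec : Claim_equal_player_splitter := by
  intro data _
  unfold Spec_player_splitter player_splitter player_splitter_alt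
  rw [PySem.List.slice_to_neg_one]
  cases data with
  | nil => simp
  | cons h t =>
    have hm : (t.length) + 1 = (h :: t).length := by simp
    have hrange : ((h :: t).length : Int) - 1 = ((t.length : Nat) : Int) := by
      simp
    rw [hrange]
    have := pv_key (h :: t) t.length hm t.length 0 0 [] [] (by omega) (by omega)
      (by omega) (by simp)
    simpa using this
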